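-- pv_equiv track=rewrite | github.com/All-Hands-AI/openhands-resolver | github_resolver/.backup.update_pr.py | extract_suggestion
-- ===== SOURCE A (Python) =====
-- def extract_suggestion(comment_body: str) -> str:
--     """Extract code suggestion from comment body"""
--     # This is a simple implementation. You might want to improve it based on your specific needs.
--     lines = comment_body.split('\n')
--     suggestion_lines = []
--     in_suggestion = False
--     for line in lines:
--         if line.strip().startswith('```'):
--             in_suggestion = not in_suggestion
--         elif in_suggestion:
--             suggestion_lines.append(line)
--     return '\n'.join(suggestion_lines) if suggestion_lines else None
-- ===== SOURCE B (Python) =====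
-- def extract_suggestion(comment_body: str) -> str:
--     """Extract code suggestion from comment body (fence-pair decomposition)."""
--     def fence(line):
--         return line.strip().startswith('```')
--
--     def skip(lines):
--         # drop lines up to (and keeping) the next fence line
--         if not lines:
--             return []
--         if fence(lines[0]):
--             return lines
--         return skip(lines[1:])
--
--     def take(lines):
--         # split off the block before the next fence line
--         if not lines:
--             return [], []
--         if fence(lines[0]):
--             return [], lines
--         block, rest = take(lines[1:])
--         return [lines[0]] + block, rest
--
--     def collect(lines):
--         opened = skip(lines)
--         if not opened:
--             return []
--         block, rest = take(opened[1:])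
--         if not rest:
--             return block
--         return block + collect(rest[1:])
--
--     out = collect(comment_body.split('\n'))
--     return '\n'.join(out) if out else None
-- ===== Notes on version B (the rewrite author's own statement) =====
-- stated objective: alternative
-- what changed: Replaces the single-pass boolean-toggle scan with a recursive fence-pair decomposition: skip to the next opening fence, split off the block up to the closing fence, and recurse on the remainder.
import Mathlib
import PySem

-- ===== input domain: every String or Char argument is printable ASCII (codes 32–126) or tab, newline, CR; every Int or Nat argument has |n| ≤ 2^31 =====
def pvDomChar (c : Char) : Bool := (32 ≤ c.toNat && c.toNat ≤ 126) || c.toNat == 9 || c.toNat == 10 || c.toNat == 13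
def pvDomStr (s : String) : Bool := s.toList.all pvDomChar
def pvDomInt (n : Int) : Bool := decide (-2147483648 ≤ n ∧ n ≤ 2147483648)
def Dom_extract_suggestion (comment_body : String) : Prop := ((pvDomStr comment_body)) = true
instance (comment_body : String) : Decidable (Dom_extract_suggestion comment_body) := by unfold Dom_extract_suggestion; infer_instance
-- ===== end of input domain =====

-- B replaces A's boolean-toggle scan by a recursive fence-pair decomposition (objective: alternative).

-- ===== PORT A =====
-- the loop body of A's for-loop over lines, state (suggestion_lines, in_suggestion)
def pvStepA (st : List String × Bool) (line : String) : List String × Bool :=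
  if PySem.Str.startswith (PySem.Str.strip line) "```" then (st.1, !st.2)
  else if st.2 then (st.1 ++ [line], st.2) else st

def extract_suggestion (comment_body : String) : Option String :=
  let lines := ((PySem.Str.split? comment_body "\n").getD [])
  let st := lines.foldl pvStepA ([], false)
  if st.1 ≠ [] then some (PySem.Str.join "\n" st.1) else none

-- ===== PORT B =====
def pvFence (line : String) : Bool := PySem.Str.startswith (PySem.Str.strip line) "```"

-- B's `skip`: drop lines before the next fence line
def pvSkip : List String → List String
  | [] => []
  | l :: rest => if pvFence l then l :: rest else pvSkip rest

-- B's `take`: split off the block before the next fence line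
def pvTake : List String → List String × List String
  | [] => ([], [])
  | l :: rest =>
    if pvFence l then ([], l :: rest)
    else
      let p := pvTake rest
      (l :: p.1, p.2)

theorem pvSkip_length_le (ls : List String) : (pvSkip ls).length ≤ ls.length := by
  induction ls with
  | nil => simp [pvSkip]
  | cons l rest ih => simp only [pvSkip]; split <;> simp <;> omega

theorem pvTake_snd_length_le (ls : List String) : (pvTake ls).2.length ≤ ls.length := by
  induction ls with
  | nil => simp [pvTake]
  | cons l rest ih => simp only [pvTake]; split <;> simp <;> omega

-- B's `collect`: `opened = skip(lines)`, then `block, rest = take(opened[1:])`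
def pvCollect (ls : List String) : List String :=
  if h1 : pvSkip ls = [] then []
  else if h2 : (pvTake (pvSkip ls).tail).2 = [] then (pvTake (pvSkip ls).tail).1
  else (pvTake (pvSkip ls).tail).1 ++ pvCollect (pvTake (pvSkip ls).tail).2.tail
termination_by ls.length
decreasing_by
  have hs := pvSkip_length_le ls
  have ht := pvTake_snd_length_le (pvSkip ls).tail
  have h1' : 0 < (pvSkip ls).length := List.length_pos_iff.mpr h1
  have h2' : 0 < (pvTake (pvSkip ls).tail).2.length := List.length_pos_iff.mpr h2
  simp only [List.length_tail] at *
  omega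

def extract_suggestion_alt (comment_body : String) : Option String :=
  let out := pvCollect (((PySem.Str.split? comment_body "\n").getD []))
  if out ≠ [] then some (PySem.Str.join "\n" out) else none

-- ===== PRECONDITION & SPEC =====
def Spec_extract_suggestion (comment_body : String) (out : Option String) : Prop := out = extract_suggestion_alt comment_body
instance (comment_body : String) (out : Option String) : Decidable (Spec_extract_suggestion comment_body out) := by unfold Spec_extract_suggestion; infer_instance

-- ===== CLAIM (what is proved, stated in full; the proofs are below) =====
def Claim_equal_extract_suggestion : Prop := ∀ (comment_body : String), Dom_extract_suggestion comment_body → Spec_extract_suggestion comment_body (extract_suggestion comment_body)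

-- ===== LEMMAS AND PROOFS =====

-- unfolding equations for B's pvCollect at a fence / non-fence head line
theorem pvCollect_fence (l : String) (rest : List String) (hf : pvFence l = true) :
    pvCollect (l :: rest) =
      (pvTake rest).1 ++
        (if (pvTake rest).2 = [] then [] else pvCollect (pvTake rest).2.tail) := by
  have hsk : pvSkip (l :: rest) = l :: rest := by simp [pvSkip, hf]
  rw [pvCollect.eq_1]
  simp only [hsk, List.tail_cons]
  split_ifs <;> simp_all

theorem pvCollect_nofence (l : String) (rest : List String) (hf : pvFence l = false) :
    pvCollect (l :: rest) = pvCollect rest := by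
  have hsk : pvSkip (l :: rest) = pvSkip rest := by simp [pvSkip, hf]
  rw [pvCollect.eq_1]
  conv_rhs => rw [pvCollect.eq_1]
  simp only [hsk]

-- the collected lines of A's fold, from either flag state, expressed through B's helpers
theorem pv_fold_eq (ls : List String) : ∀ acc : List String,
    (ls.foldl pvStepA (acc, false)).1 = acc ++ pvCollect ls ∧
    (ls.foldl pvStepA (acc, true)).1 =
      acc ++ (pvTake ls).1 ++
        (if (pvTake ls).2 = [] then [] else pvCollect (pvTake ls).2.tail) := by
  induction ls with
  | nil =>
    intro acc
    refine ⟨by simp [pvCollect, pvSkip], ?_⟩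
    simp [pvTake]
  | cons l rest ih =>
    intro acc
    have hstep : ∀ b, pvStepA (acc, b) l =
        if pvFence l then (acc, !b) else if b then (acc ++ [l], b) else (acc, b) := fun _ => rfl
    by_cases hf : pvFence l = true
    · constructor
      · simp only [List.foldl, hstep, hf, reduceIte, Bool.not_false]
        rw [(ih acc).2, pvCollect_fence l rest hf, List.append_assoc]
      · simp only [List.foldl, hstep, hf, reduceIte, Bool.not_true]
        rw [(ih acc).1]
        simp [pvTake, hf]
    · rw [Bool.not_eq_true] at hf
      have hcoll := pvCollect_nofence l rest hf
      constructor
      · simp only [List.foldl, hstep, hf, Bool.false_eq_true, reduceIte]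
        rw [(ih acc).1, hcoll]
      · simp only [List.foldl, hstep, hf, Bool.false_eq_true, reduceIte]
        rw [(ih (acc ++ [l])).2]
        simp [pvTake, hf]

-- ===== VERDICT (by name: the statement is the Claim_ definition above) =====
theorem extract_suggestion_spec : Claim_equal_extract_suggestion := by
  intro comment_body _
  unfold Spec_extract_suggestion extract_suggestion extract_suggestion_alt
  have := (pv_fold_eq (((PySem.Str.split? comment_body "\n").getD [])) []).1
  simp only [List.nil_append] at this
  simp [this]
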